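-- pv_equiv track=rewrite | github.com/Szkodzik/Python-course-SI | L2.py | sortowanie_1
-- ===== SOURCE A (Python) =====
-- def trzy_pierwsze_wartosci(lista, wp):
--     indeksy = []
--     wartosci = []
--     licznik = 0
--     for i in range(len(lista)):
--         if lista[i] > wp:
--             indeksy.append(i)
--             wartosci.append(lista[i])
--             licznik += 1
--         if licznik == 3:
--             break
--
--     return indeksy, wartosci
--
-- def sortowanie_1(lista,wp):
--     indeksy, wartosci = trzy_pierwsze_wartosci(lista, wp)
--     indeksy_wartosci = []
--     index = []
--     for k in range(len(indeksy)):
--         indeksy_wartosci.append([indeksy[k],wartosci[k]])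
--
--     zakres = len(indeksy_wartosci) - 1
--     for i in range(zakres):
--         for j in range(zakres):
--             if indeksy_wartosci[j+1][1] > indeksy_wartosci[j][1]:
--                 indeksy_wartosci[j+1], indeksy_wartosci[j] = indeksy_wartosci[j], indeksy_wartosci[j+1]
--
--     for i in range(len(indeksy_wartosci)):
--         index.append(indeksy_wartosci[i][0])
--
--     return index
-- ===== SOURCE B (Python) =====
-- def sortowanie_1(lista, wp):
--     # Streaming top-3: one scan, each qualifying (index, value) pair is inserted
--     # into a descending-by-value ordered accumulator (ties keep scan order);
--     # once the accumulator holds three pairs the rest of the list is ignored.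
--     def wstaw(acc, pair):
--         if not acc or acc[0][1] >= pair[1]:
--             return acc[:1] + wstaw(acc[1:], pair) if acc else [pair]
--         return [pair] + acc
--
--     acc = []
--     for i, v in enumerate(lista):
--         if len(acc) == 3:
--             break
--         if v > wp:
--             acc = wstaw(acc, (i, v))
--     return [i for i, _ in acc]
-- ===== Notes on version B (the rewrite author's own statement) =====
-- stated objective: alternative
-- what changed: Replaces A's staged offline pipeline (collect first three qualifying indices and values into two parallel lists, zip them, O(k^2) bubble sort, projection pass) with an online streaming top-3: one scan that inserts each qualifying (index,value) pair into a descending-ordered accumulator as it is encountered, so no separate sort phase or parallel lists exist.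
import Mathlib
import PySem

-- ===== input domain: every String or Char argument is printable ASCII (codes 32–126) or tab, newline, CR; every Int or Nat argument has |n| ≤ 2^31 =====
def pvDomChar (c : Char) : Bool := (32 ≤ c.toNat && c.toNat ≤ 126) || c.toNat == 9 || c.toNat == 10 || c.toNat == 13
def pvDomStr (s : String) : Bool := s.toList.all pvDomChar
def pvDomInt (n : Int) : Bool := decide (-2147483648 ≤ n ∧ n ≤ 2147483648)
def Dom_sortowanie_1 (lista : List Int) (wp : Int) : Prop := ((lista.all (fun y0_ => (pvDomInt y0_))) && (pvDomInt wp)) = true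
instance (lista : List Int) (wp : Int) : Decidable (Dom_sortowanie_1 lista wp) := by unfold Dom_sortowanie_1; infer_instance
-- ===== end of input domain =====

-- B replaces A's staged pipeline (collect three, zip, bubble sort, project) with an online
-- streaming top-3: one scan inserting each qualifying pair into an ordered accumulator (objective: alternative).

-- ===== PORT A =====
-- the loop of trzy_pierwsze_wartosci: walk the indexed elements, appending index and value
-- when lista[i] > wp; break as soon as licznik == 3
def pvLoopA (wp : Int) : List (Int × Int) → List Int → List Int → Nat → List Int × List Int
  | [], ind, war, _ => (ind, war)
  | (i, v) :: rest, ind, war, licz =>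
    if v > wp then
      if licz + 1 == 3 then (ind ++ [i], war ++ [v])
      else pvLoopA wp rest (ind ++ [i]) (war ++ [v]) (licz + 1)
    else
      if licz == 3 then (ind, war)
      else pvLoopA wp rest ind war licz

-- one inner pass 'for j in range(zakres)': compare/swap adjacent pairs left to right
def pvBubbleInner : List (Int × Int) → List (Int × Int)
  | a :: b :: rest => if b.2 > a.2 then b :: pvBubbleInner (a :: rest) else a :: pvBubbleInner (b :: rest)
  | l => l

def sortowanie_1 (lista : List Int) (wp : Int) : List Int :=
  let iw := pvLoopA wp (PySem.List.enumerate lista) [] [] 0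
  let indeksy := iw.1
  let wartosci := iw.2
  let indeksy_wartosci := (PySem.List.pyRange 0 (PySem.List.len indeksy)).foldl
      (fun acc k => acc ++ [(PySem.List.pyGetD indeksy k 0, PySem.List.pyGetD wartosci k 0)]) []
  let zakres := indeksy_wartosci.length - 1
  let posortowane := (List.range zakres).foldl (fun acc _ => pvBubbleInner acc) indeksy_wartosci
  (PySem.List.pyRange 0 (PySem.List.len posortowane)).foldl
      (fun acc i => acc ++ [(PySem.List.pyGetD posortowane i (0, 0)).1]) []

-- ===== PORT B =====
-- wstaw: insert a pair into the descending-by-value accumulator, after all pairs with value ≥ its value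
def pvWstaw (p : Int × Int) : List (Int × Int) → List (Int × Int)
  | [] => [p]
  | q :: rest => if q.2 ≥ p.2 then q :: pvWstaw p rest else p :: q :: rest

-- the single scan: stop once the accumulator holds three pairs, insert qualifying pairs online
def pvScanB (wp : Int) : List (Int × Int) → List (Int × Int) → List (Int × Int)
  | [], acc => acc
  | p :: rest, acc =>
    if acc.length == 3 then acc
    else if p.2 > wp then pvScanB wp rest (pvWstaw p acc)
    else pvScanB wp rest acc

def sortowanie_1_alt (lista : List Int) (wp : Int) : List Int :=
  (pvScanB wp (PySem.List.enumerate lista) []).map Prod.fst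

-- ===== PRECONDITION & SPEC =====
def Spec_sortowanie_1 (lista : List Int) (wp : Int) (out : List Int) : Prop := out = sortowanie_1_alt lista wp
instance (lista : List Int) (wp : Int) (out : List Int) : Decidable (Spec_sortowanie_1 lista wp out) := by unfold Spec_sortowanie_1; infer_instance

-- ===== CLAIM (what is proved, stated in full; the proofs are below) =====
def Claim_equal_sortowanie_1 : Prop := ∀ (lista : List Int) (wp : Int), Dom_sortowanie_1 lista wp → Spec_sortowanie_1 lista wp (sortowanie_1 lista wp)

-- ===== LEMMAS AND PROOFS =====

-- A's collector returns the first ≤ (3 - licz) filtered (index, value) pairs, split into two lists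
theorem pvLoopA_eq (wp : Int) (rest : List (Int × Int)) :
    ∀ (ind war : List Int) (licz : Nat), licz < 3 →
    pvLoopA wp rest ind war licz =
      (ind ++ ((rest.filter (fun p => p.2 > wp)).take (3 - licz)).map Prod.fst,
       war ++ ((rest.filter (fun p => p.2 > wp)).take (3 - licz)).map Prod.snd) := by
  induction rest with
  | nil => intro ind war licz _; simp [pvLoopA]
  | cons p rest ih =>
    intro ind war licz hlicz
    obtain ⟨i, v⟩ := p
    by_cases hv : v > wp
    · by_cases h3 : licz + 1 = 3
      · have : licz = 2 := by omega
        subst this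
        simp [pvLoopA, hv]
      · have hlicz' : licz + 1 < 3 := by omega
        have htake : 3 - licz = (3 - (licz + 1)) + 1 := by omega
        simp only [pvLoopA, if_pos hv, beq_iff_eq, h3, ih _ _ _ hlicz',
          List.filter_cons, htake]
        simp [hv, List.append_assoc]
    · have h3 : licz ≠ 3 := by omega
      simp only [pvLoopA, if_neg hv, beq_iff_eq, if_neg h3, ih _ _ _ hlicz, List.filter_cons]
      simp [hv]

-- A's pair-building loop reassembles exactly the pair list the collector split apart
theorem pvRebuild_eq (Q : List (Int × Int)) :
    (PySem.List.pyRange 0 (PySem.List.len (Q.map Prod.fst))).foldl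
      (fun acc k => acc ++ [(PySem.List.pyGetD (Q.map Prod.fst) k 0,
                             PySem.List.pyGetD (Q.map Prod.snd) k 0)]) [] = Q := by
  rw [PySem.List.foldl_append_singleton_eq_map]
  have hlen : PySem.List.len (Q.map Prod.fst) = PySem.List.len Q := by
    simp [PySem.List.len]
  rw [hlen]
  have hf : (fun k : Int => (PySem.List.pyGetD (Q.map Prod.fst) k 0,
      PySem.List.pyGetD (Q.map Prod.snd) k 0))
      = fun k : Int => PySem.List.pyGetD Q k ((0 : Int), (0 : Int)) := by
    funext k
    rw [show (0:Int) = Prod.fst ((0:Int),(0:Int)) from rfl]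
    rw [PySem.List.pyGetD_map Prod.fst Q k ((0:Int),(0:Int)),
        PySem.List.pyGetD_map Prod.snd Q k ((0:Int),(0:Int))]
  rw [hf, List.nil_append, PySem.List.map_pyGetD_pyRange_zero]

-- A's final projection loop is map Prod.fst
theorem pvProj_eq (S : List (Int × Int)) :
    (PySem.List.pyRange 0 (PySem.List.len S)).foldl
      (fun acc i => acc ++ [(PySem.List.pyGetD S i ((0 : Int), (0 : Int))).1]) [] = S.map Prod.fst := by
  rw [PySem.List.foldl_append_singleton_eq_map, List.nil_append]
  conv_rhs => rw [← PySem.List.map_pyGetD_pyRange_zero S ((0:Int),(0:Int))]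
  rw [List.map_map]
  rfl

theorem pvWstaw_length (p : Int × Int) (acc : List (Int × Int)) :
    (pvWstaw p acc).length = acc.length + 1 := by
  induction acc with
  | nil => rfl
  | cons q rest ih => simp only [pvWstaw]; split_ifs <;> simp [ih]

-- B's scan folds the first ≤ (3 - |acc|) filtered pairs into the accumulator by ordered insertion
theorem pvScanB_eq (wp : Int) (l : List (Int × Int)) :
    ∀ (acc : List (Int × Int)), acc.length ≤ 3 →
    pvScanB wp l acc =
      ((l.filter (fun p => p.2 > wp)).take (3 - acc.length)).foldl (fun a p => pvWstaw p a) acc := by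
  induction l with
  | nil => intro acc _; simp [pvScanB]
  | cons p rest ih =>
    intro acc hacc
    by_cases h3 : acc.length = 3
    · simp [pvScanB, h3]
    · by_cases hv : p.2 > wp
      · have hlen : (pvWstaw p acc).length ≤ 3 := by rw [pvWstaw_length]; omega
        have htake : 3 - acc.length = (3 - (pvWstaw p acc).length) + 1 := by
          rw [pvWstaw_length]; omega
        simp only [pvScanB, beq_iff_eq, if_neg h3, if_pos hv, ih _ hlen, List.filter_cons, htake]
        simp [hv]
      · simp only [pvScanB, beq_iff_eq, if_neg h3, if_neg hv, ih _ hacc, List.filter_cons]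
        simp [hv]

-- on any list of at most three pairs, A's (len−1) full bubble passes produce exactly
-- B's descending ordered-insertion fold
theorem pvSmall (P : List (Int × Int)) (h : P.length ≤ 3) :
    (List.range (P.length - 1)).foldl (fun acc _ => pvBubbleInner acc) P =
      P.foldl (fun a p => pvWstaw p a) [] := by
  rcases P with _ | ⟨a, _ | ⟨b, _ | ⟨c, _ | ⟨d, t⟩⟩⟩⟩
  · rfl
  · rfl
  · simp only [List.length_cons, List.length_nil]
    norm_num [List.range_succ]
    simp only [pvBubbleInner, pvWstaw]
    split_ifs <;> simp_all <;> omega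
  · simp only [List.length_cons, List.length_nil]
    norm_num [List.range_succ]
    simp only [pvBubbleInner, pvWstaw]
    split_ifs <;>
      (try simp_all [pvBubbleInner, pvWstaw]) <;>
      (try split_ifs) <;> (try simp_all) <;> first | rfl | omega
  · exfalso; simp at h; omega

-- ===== VERDICT (by name: the statement is the Claim_ definition above) =====
theorem sortowanie_1_spec : Claim_equal_sortowanie_1 := by
  intro lista wp _
  unfold Spec_sortowanie_1 sortowanie_1 sortowanie_1_alt
  rw [pvLoopA_eq wp _ [] [] 0 (by omega), pvScanB_eq wp _ [] (by simp)]
  simp only [List.nil_append, Nat.sub_zero, List.length_nil]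
  rw [pvRebuild_eq]
  have hlen3 : (((PySem.List.enumerate lista).filter (fun p => p.2 > wp)).take 3).length ≤ 3 := by
    simp [List.length_take]
  rw [pvSmall _ hlen3, pvProj_eq]
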